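-- pv_equiv track=rewrite | github.com/wthaovan112233-cyber/phantich.md5 | bot.py | classify_all
-- ===== SOURCE A (Python) =====
-- def classify_all(history_sum):
--     tx, parity, level, extreme = [], [], [], []
--
--     for s in history_sum:
--         tx.append("T" if s >= 11 else "X")
--         parity.append("C" if s % 2 == 0 else "L")
--         level.append("H" if s >= 11 else "L")
--
--         if s <= 6:
--             extreme.append("EL")
--         elif s >= 15:
--             extreme.append("EH")
--         else:
--             extreme.append("N")
--
--     return tx, parity, level, extreme
-- ===== SOURCE B (Python) =====
-- def classify_all(history_sum):
--     # classify each DISTINCT sum once, memoised in a dict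
--     memo = {}
--     for s in history_sum:
--         if s not in memo:
--             memo[s] = (
--                 ("X", "T")[s >= 11],
--                 ("L", "C")[s % 2 == 0],
--                 ("L", "H")[s >= 11],
--                 "EL" if s <= 6 else ("EH" if s >= 15 else "N"),
--             )
--     # four staged passes reading the memo
--     tx = [memo[s][0] for s in history_sum]
--     parity = [memo[s][1] for s in history_sum]
--     level = [memo[s][2] for s in history_sum]
--     extreme = [memo[s][3] for s in history_sum]
--     return tx, parity, level, extreme
-- ===== Notes on version B (the rewrite author's own statement) =====
-- stated objective: alternative
-- what changed: Replaces A's single four-append loop with a memoised-dictionary design: the 4-tuple classification is computed once per DISTINCT sum into a dict, and the four result lists are then produced by four staged lookup passes over that dict.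
import Mathlib
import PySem

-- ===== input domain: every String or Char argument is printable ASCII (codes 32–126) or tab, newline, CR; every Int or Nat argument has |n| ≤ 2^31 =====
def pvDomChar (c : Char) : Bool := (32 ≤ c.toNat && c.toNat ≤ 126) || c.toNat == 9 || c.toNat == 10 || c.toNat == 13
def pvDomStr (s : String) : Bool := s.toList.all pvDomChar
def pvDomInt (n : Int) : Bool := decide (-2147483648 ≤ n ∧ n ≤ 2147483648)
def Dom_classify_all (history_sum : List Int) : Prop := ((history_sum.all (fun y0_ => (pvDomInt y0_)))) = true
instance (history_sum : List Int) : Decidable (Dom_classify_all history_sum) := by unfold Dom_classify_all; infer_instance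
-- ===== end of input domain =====

-- B memoises the 4-tuple classification per distinct sum in a dict and reads the four lists out in staged lookup passes (alternative, same cost).

-- ===== PORT A =====
-- literal port of A: one pass appending to four accumulator lists
def classify_all (history_sum : List Int) : List String × List String × List String × List String :=
  history_sum.foldl
    (fun st s =>
      (st.1 ++ [if s ≥ 11 then "T" else "X"],
       st.2.1 ++ [if PySem.Int.mod s 2 = 0 then "C" else "L"],
       st.2.2.1 ++ [if s ≥ 11 then "H" else "L"],
       st.2.2.2 ++ [if s ≤ 6 then "EL" else if s ≥ 15 then "EH" else "N"]))
    ([], [], [], [])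

-- ===== PORT B =====
-- the 4-tuple B stores per distinct sum (Python's bool tuple-indexing ("X","T")[s>=11] is the conditional)
def pvRowB (s : Int) : String × String × String × String :=
  ((if s ≥ 11 then "T" else "X"),
   (if PySem.Int.mod s 2 = 0 then "C" else "L"),
   (if s ≥ 11 then "H" else "L"),
   (if s ≤ 6 then "EL" else if s ≥ 15 then "EH" else "N"))

-- literal port of B: memo-building loop, then four lookup passes.
-- memo[s] always succeeds in Python (every key was inserted); getD's default is never reached.
def classify_all_alt (history_sum : List Int) : List String × List String × List String × List String :=
  let memo := history_sum.foldl
    (fun d s => if d.contains s then d else d.insert s (pvRowB s))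
    (PySem.Dict.empty)
  (history_sum.map (fun s => (memo.getD s ("", "", "", "")).1),
   history_sum.map (fun s => (memo.getD s ("", "", "", "")).2.1),
   history_sum.map (fun s => (memo.getD s ("", "", "", "")).2.2.1),
   history_sum.map (fun s => (memo.getD s ("", "", "", "")).2.2.2))

-- ===== PRECONDITION & SPEC =====
def Spec_classify_all (history_sum : List Int) (out : List String × List String × List String × List String) : Prop := out = classify_all_alt history_sum
instance (history_sum : List Int) (out : List String × List String × List String × List String) : Decidable (Spec_classify_all history_sum out) := by unfold Spec_classify_all; infer_instance

-- ===== CLAIM =====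
def Claim_equal_classify_all : Prop := ∀ (history_sum : List Int), Dom_classify_all history_sum → Spec_classify_all history_sum (classify_all history_sum)

-- ===== LEMMAS AND PROOFS =====
-- loop invariant for A's fold: the accumulators collect the four row projections
theorem classify_all_foldl (hs : List Int) (tx p l e : List String) :
    hs.foldl
      (fun st s =>
        (st.1 ++ [if s ≥ 11 then "T" else "X"],
         st.2.1 ++ [if PySem.Int.mod s 2 = 0 then "C" else "L"],
         st.2.2.1 ++ [if s ≥ 11 then "H" else "L"],
         st.2.2.2 ++ [if s ≤ 6 then "EL" else if s ≥ 15 then "EH" else "N"]))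
      (tx, p, l, e)
    = (tx ++ hs.map (fun s => (pvRowB s).1),
       p ++ hs.map (fun s => (pvRowB s).2.1),
       l ++ hs.map (fun s => (pvRowB s).2.2.1),
       e ++ hs.map (fun s => (pvRowB s).2.2.2)) := by
  induction hs generalizing tx p l e with
  | nil => simp
  | cons x xs ih => rw [List.foldl_cons, ih]; simp [pvRowB]

-- invariant of B's memo loop: every key the final dict answers for answers with pvRowB,
-- and every element of the traversed list (or key already present) is answered
theorem memo_getD (hs : List Int) (d : PySem.Dict Int (String × String × String × String))
    (hd : ∀ k, d.contains k = true → d.getD k ("", "", "", "") = pvRowB k) :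
    ∀ s, (s ∈ hs ∨ d.contains s = true) →
      (hs.foldl (fun d s => if d.contains s then d else d.insert s (pvRowB s)) d).getD s ("", "", "", "")
        = pvRowB s := by
  induction hs generalizing d with
  | nil =>
    intro s h
    rcases h with h | h
    · simp at h
    · exact hd s h
  | cons x xs ih =>
    intro s h
    rw [List.foldl_cons]
    by_cases hx : d.contains x = true
    · simp only [hx, if_true]
      apply ih d hd
      rcases h with h | h
      · rcases List.mem_cons.mp h with rfl | h'
        · exact Or.inr hx
        · exact Or.inl h'
      · exact Or.inr h
    · simp only [hx, if_false, Bool.false_eq_true]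
      apply ih
      · intro k hk
        rw [PySem.Dict.getD_insert]
        by_cases hkx : k = x
        · simp [hkx]
        · simp only [hkx, if_false]
          apply hd
          rw [PySem.Dict.contains_insert] at hk
          simpa [hkx] using hk
      · rcases h with h | h
        · rcases List.mem_cons.mp h with rfl | h'
          · exact Or.inr (PySem.Dict.contains_insert_self d s (pvRowB s))
          · exact Or.inl h'
        · exact Or.inr (by rw [PySem.Dict.contains_insert]; simp [h])

-- ===== VERDICT =====
theorem classify_all_spec : Claim_equal_classify_all := by
  intro hs _
  unfold Spec_classify_all classify_all classify_all_alt
  rw [classify_all_foldl]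
  have hm : ∀ s ∈ hs,
      (hs.foldl (fun d s => if d.contains s then d else d.insert s (pvRowB s))
        (PySem.Dict.empty)).getD s ("", "", "", "") = pvRowB s := by
    intro s hsin
    exact memo_getD hs PySem.Dict.empty
      (by intro k hk; simp [PySem.Dict.contains_empty] at hk) s (Or.inl hsin)
  simp only [List.nil_append]
  refine Prod.ext ?_ (Prod.ext ?_ (Prod.ext ?_ ?_)) <;>
    · apply List.map_congr_left
      intro s hsin
      rw [hm s hsin]
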